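-- pv_equiv track=rewrite | github.com/pypi-data/pypi-mirror-367 | packages/data-auditor/data_auditor-0.1.1-py3-none-any.whl/data_auditor/fairness.py | intersectional_fairness_groups
-- ===== SOURCE A (Python) =====
-- from itertools import combinations
--
-- def intersectional_fairness_groups(sensitive_features:list[str]) -> dict:
--     """Determines interseccional sensitive groups.
--     For each sensitive group, returns the features that
--     create it.
--     """
--     res = []
--     for i in range(1, len(sensitive_features) + 1):
--         c = list(combinations(sensitive_features, i))
--         res.extend(c)
--     group_lst = ["_".join(pairs) for pairs in res]
--
--     intersectional_groups = {}
--     for g in group_lst: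
--         intersectional_groups[g] = g.split("_")
--
--     return intersectional_groups
-- ===== SOURCE B (Python) =====
-- def intersectional_fairness_groups(sensitive_features: list[str]) -> dict:
--     """Pascal-triangle DP: rows[k] holds the size-k combinations built so far.
--     Scanning the features right-to-left and prepending keeps itertools'
--     lexicographic order within each size; rows are emitted smallest size first."""
--     rows = [[[]]]
--     for f in reversed(sensitive_features):
--         ext = [[[f] + c for c in row] for row in rows]
--         rows = [old + new for old, new in zip([[]] + ext, rows + [[]])]
--     groups = {}
--     for row in rows[1:]:
--         for c in row:
--             key = "_".join(c)
--             groups[key] = key.split("_")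
--     return groups
-- ===== Notes on version B (the rewrite author's own statement) =====
-- stated objective: alternative
-- what changed: Replaces the per-size itertools.combinations passes with a single Pascal-triangle dynamic program: scanning the features right-to-left while maintaining rows[k], the list of size-k combinations, then emitting rows graded by size; same O(2^n) output built by a different enumeration scheme.
import Mathlib
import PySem

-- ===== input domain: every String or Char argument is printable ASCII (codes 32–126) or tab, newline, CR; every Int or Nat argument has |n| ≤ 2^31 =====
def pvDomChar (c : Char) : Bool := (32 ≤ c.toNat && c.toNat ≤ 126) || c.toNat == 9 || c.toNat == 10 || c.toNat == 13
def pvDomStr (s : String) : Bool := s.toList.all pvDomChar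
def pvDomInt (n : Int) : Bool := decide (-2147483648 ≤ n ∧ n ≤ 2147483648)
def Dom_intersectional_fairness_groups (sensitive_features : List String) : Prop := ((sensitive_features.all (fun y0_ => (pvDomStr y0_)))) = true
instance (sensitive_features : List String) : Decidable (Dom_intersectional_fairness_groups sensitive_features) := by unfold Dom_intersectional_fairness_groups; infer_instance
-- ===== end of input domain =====

-- B replaces the per-size itertools.combinations passes by a single Pascal-triangle
-- DP over the features (rows[k] = size-k combinations), a different decomposition of
-- the same O(2^n) enumeration; A = B is proved on all inputs (both are total).


-- ===== PORT A =====
-- hand port of itertools.combinations(xs, k): exact list of k-combinations in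
-- itertools' order (lexicographic in the positions of xs)
def pvComb : List String → Nat → List (List String)
  | _, 0 => [[]]
  | [], _ + 1 => []
  | x :: xs, k + 1 => (pvComb xs k).map (fun c => x :: c) ++ pvComb xs (k + 1)

def intersectional_fairness_groups (sensitive_features : List String) : List (String × List String) :=
  -- res = []; for i in range(1, len+1): res.extend(list(combinations(sensitive_features, i)))
  let res : List (List String) :=
    (PySem.List.pyRange 1 (sensitive_features.length + 1) 1).foldl
      (fun r i => r ++ pvComb sensitive_features i.toNat) []
  -- group_lst = ["_".join(pairs) for pairs in res]
  let group_lst := res.map (fun pairs => PySem.Str.join "_" pairs)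
  -- intersectional_groups = {}; for g in group_lst: intersectional_groups[g] = g.split("_")
  let d : PySem.Dict String (List String) :=
    group_lst.foldl (fun d g => d.insert g (((PySem.Str.split? g "_").getD []))) PySem.Dict.empty
  d.items

-- ===== PORT B =====
def intersectional_fairness_groups_alt (sensitive_features : List String) : List (String × List String) :=
  -- rows = [[[]]]; for f in reversed(sensitive_features): ext = …; rows = zip-merge
  let rows : List (List (List String)) :=
    sensitive_features.reverse.foldl
      (fun rows f =>
        let ext := rows.map (fun row => row.map (fun c => f :: c))
        List.zipWith (· ++ ·) ([[]] ++ ext) (rows ++ [[]]))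
      [[[]]]
  -- groups = {}; for row in rows[1:]: for c in row: key = "_".join(c); groups[key] = key.split("_")
  let d : PySem.Dict String (List String) :=
    (rows.drop 1).foldl
      (fun d row => row.foldl
        (fun d c =>
          let key := PySem.Str.join "_" c
          d.insert key (((PySem.Str.split? key "_").getD []))) d)
      PySem.Dict.empty
  d.items

-- ===== PRECONDITION & SPEC =====
def Spec_intersectional_fairness_groups (sensitive_features : List String) (out : List (String × List String)) : Prop := out = intersectional_fairness_groups_alt sensitive_features
instance (sensitive_features : List String) (out : List (String × List String)) : Decidable (Spec_intersectional_fairness_groups sensitive_features out) := by unfold Spec_intersectional_fairness_groups; infer_instance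

-- ===== CLAIM (what is proved, stated in full; the proofs are below) =====
def Claim_equal_intersectional_fairness_groups : Prop := ∀ (sensitive_features : List String), Dom_intersectional_fairness_groups sensitive_features → Spec_intersectional_fairness_groups sensitive_features (intersectional_fairness_groups sensitive_features)

-- ===== LEMMAS AND PROOFS =====

-- no k-combinations of fewer than k elements
theorem pvComb_eq_nil_of_lt : ∀ (xs : List String) (k : Nat), xs.length < k → pvComb xs k = [] := by
  intro xs
  induction xs with
  | nil => intro k hk; cases k with
    | zero => omega
    | succ k => rfl
  | cons x xs ih =>
    intro k hk
    cases k with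
    | zero => omega
    | succ k =>
      simp only [pvComb]
      have h1 : xs.length < k := by simp at hk; omega
      rw [ih k h1, ih (k+1) (by omega)]
      simp

-- one DP step turns the table for xs into the table for f :: xs
theorem pvStep_eq (xs : List String) (f : String) :
    (List.zipWith (· ++ ·)
      ([[]] ++ ((List.range (xs.length + 1)).map (pvComb xs)).map (fun row => row.map (fun c => f :: c)))
      (((List.range (xs.length + 1)).map (pvComb xs)) ++ [[]]))
    = (List.range (xs.length + 2)).map (pvComb (f :: xs)) := by
  apply List.ext_getElem
  · simp
  · intro i h1 h2
    simp only [List.getElem_zipWith, List.getElem_map, List.getElem_range]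
    have hi : i < xs.length + 2 := by simpa using h2
    cases i with
    | zero =>
      simp [pvComb]
    | succ i =>
      have hi' : i < xs.length + 1 := by omega
      simp only [List.singleton_append, List.getElem_cons_succ, List.getElem_map,
          List.getElem_range]
      by_cases hc : i + 1 < xs.length + 1
      · rw [List.getElem_append_left (by simpa using hc), List.getElem_map, List.getElem_range]
        rfl
      · have : i = xs.length := by omega
        subst this
        rw [List.getElem_append_right (by simp)]
        simp [pvComb, pvComb_eq_nil_of_lt xs (xs.length + 1) (by omega)]

-- the DP fold computes exactly the table of combinations, graded by size
theorem pvRows_eq (xs : List String) :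
    xs.reverse.foldl
      (fun rows f =>
        let ext := rows.map (fun row => row.map (fun c => f :: c))
        List.zipWith (· ++ ·) ([[]] ++ ext) (rows ++ [[]]))
      [[[]]]
    = (List.range (xs.length + 1)).map (pvComb xs) := by
  induction xs with
  | nil => rfl
  | cons f xs ih =>
    rw [List.reverse_cons, List.foldl_append, ih, List.foldl_cons, List.foldl_nil]
    simpa using pvStep_eq xs f

-- A's range of sizes 1..n, as a map over List.range
theorem pvRange_eq (n : Nat) :
    PySem.List.pyRange 1 ((n : Int) + 1) 1 = (List.range n).map (fun k => ((k + 1 : Nat) : Int)) := by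
  induction n with
  | zero => rfl
  | succ n ih =>
    rw [show ((n + 1 : Nat) : Int) + 1 = ((n : Int) + 1) + 1 by push_cast; ring,
        PySem.List.pyRange_one_succ_right (by omega), ih, List.range_succ, List.map_append]
    simp

theorem intersectional_eq (sensitive_features : List String) :
    intersectional_fairness_groups sensitive_features
      = intersectional_fairness_groups_alt sensitive_features := by
  unfold intersectional_fairness_groups intersectional_fairness_groups_alt
  simp only []
  rw [pvRows_eq, pvRange_eq sensitive_features.length,
      PySem.List.foldl_append_eq_flatMap, ← List.foldl_flatten, List.foldl_map, List.nil_append]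
  have hdrop : ((List.range (sensitive_features.length + 1)).map (pvComb sensitive_features)).drop 1
      = (List.range sensitive_features.length).map (fun k => pvComb sensitive_features (k + 1)) := by
    rw [List.range_succ_eq_map]
    simp [List.map_map, Function.comp]
  rw [hdrop, ← List.flatMap_def, List.flatMap_map]
  rfl

-- ===== VERDICT (by name: the statement is the Claim_ definition above) =====
theorem intersectional_fairness_groups_spec : Claim_equal_intersectional_fairness_groups := by
  intro sf _
  unfold Spec_intersectional_fairness_groups
  exact intersectional_eq sf
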